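-- pv_equiv track=rewrite | github.com/DasVinch/adventofcode | y2016/day7.py | ssl_can
-- ===== SOURCE A (Python) =====
-- import typing as typ
--
-- def aba_set(s: str) -> typ.Set[str]:
--     out: typ.Set[str] = set()
--     for k in range(len(s)-2):
--         if s[k] != s[k+1] and s[k] == s[k+2]:
--             out.add(s[k:k+3])
--     return out
--
-- def bab_set(s: str) -> typ.Set[str]:
--     aba = aba_set(s)
--
--     return set(map(lambda ss: ss[1:] + ss[1], aba))
--
-- def ssl_can(linearr: typ.List[str]) -> bool:
--     aba: typ.Set[str] = set()
--     bab: typ.Set[str] = set()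
--     for s in linearr[::2]:
--         aba.update(aba_set(s))
--     for s in linearr[1::2]:
--         bab.update(bab_set(s))
--
--     return len(aba.intersection(bab)) > 0
-- ===== SOURCE B (Python) =====
-- def ssl_can(linearr):
--     supers = linearr[::2]
--     hypers = linearr[1::2]
--     pairs = {(a, b)
--              for s in supers
--              for a, b, c in zip(s, s[1:], s[2:])
--              if a == c and a != b}
--     return any(b + a + b in h for a, b in pairs for h in hypers)
-- ===== Notes on version B (the rewrite author's own statement) =====
-- stated objective: simpler
-- what changed: B collects the supernet (a,b) ABA pairs in one comprehension and, instead of materializing a BAB set from the hypernets and intersecting two sets, directly checks each candidate bab = b+a+b as a substring of the hypernet strings with any(...), stopping at the first hit.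
import Mathlib
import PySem

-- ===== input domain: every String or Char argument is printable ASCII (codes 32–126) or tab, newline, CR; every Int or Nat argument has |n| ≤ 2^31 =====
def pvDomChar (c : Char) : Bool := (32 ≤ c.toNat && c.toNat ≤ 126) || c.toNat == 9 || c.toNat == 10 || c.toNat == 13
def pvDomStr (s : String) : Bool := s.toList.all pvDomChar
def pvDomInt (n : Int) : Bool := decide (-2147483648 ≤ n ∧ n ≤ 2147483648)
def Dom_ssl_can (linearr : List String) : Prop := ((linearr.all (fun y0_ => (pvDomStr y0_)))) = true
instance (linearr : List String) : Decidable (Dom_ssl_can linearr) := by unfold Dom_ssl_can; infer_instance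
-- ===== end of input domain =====

-- B replaces A's build-two-sets-and-intersect with a single supernet ABA-pair pass plus an
-- on-demand substring check of the hypernets (simpler: no second set, no intersection).

-- ===== PORT A =====
-- aba_set(s): all triples s[k:k+3] with s[k] != s[k+1] and s[k] == s[k+2] (strings modeled as List Char)
def aba_set (s : List Char) : PySem.Set (List Char) :=
  (PySem.List.pyRange 0 ((s.length : Int) - 2)).foldl
    (fun out k =>
      if PySem.List.pyGet? s k ≠ PySem.List.pyGet? s (k + 1) ∧
         PySem.List.pyGet? s k = PySem.List.pyGet? s (k + 2)
      then out.add (PySem.List.slice s (some k) (some (k + 3)))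
      else out) PySem.Set.empty

-- bab_set(s) = set(map(lambda ss: ss[1:] + ss[1], aba_set(s)))
def bab_set (s : List Char) : PySem.Set (List Char) :=
  PySem.Set.ofList ((aba_set s).map (fun ss =>
    match PySem.List.pyGet? ss 1 with
    | some c => PySem.List.slice ss (some 1) none ++ [c]
    | none => []))  -- unreachable: every element of aba_set has length 3 (Python would raise IndexError)

def ssl_can (linearr : List String) : Bool :=
  let aba := ((PySem.List.slice? linearr none none 2).getD []).foldl
      (fun acc s => acc.update (aba_set s.toList)) PySem.Set.empty
  let bab := ((PySem.List.slice? linearr (some 1) none 2).getD []).foldl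
      (fun acc s => acc.update (bab_set s.toList)) PySem.Set.empty
  decide (0 < PySem.Set.len (aba.inter bab))

-- ===== PORT B =====
def ssl_can_alt (linearr : List String) : Bool :=
  let supers := (PySem.List.slice? linearr none none 2).getD []
  let hypers := (PySem.List.slice? linearr (some 1) none 2).getD []
  let pairs : PySem.Set (Char × Char) := PySem.Set.ofList (supers.flatMap (fun s =>
      ((((s.toList).zip (PySem.List.slice s.toList (some 1) none)).zip
          (PySem.List.slice s.toList (some 2) none)).filter
        (fun t => t.1.1 == t.2 && t.1.1 != t.1.2)).map (fun t => (t.1.1, t.1.2))))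
  pairs.any (fun p => hypers.any (fun h => PySem.Chars.isIn [p.2, p.1, p.2] h.toList))

-- ===== PRECONDITION & SPEC =====
def Spec_ssl_can (linearr : List String) (out : Bool) : Prop := out = ssl_can_alt linearr
instance (linearr : List String) (out : Bool) : Decidable (Spec_ssl_can linearr out) := by unfold Spec_ssl_can; infer_instance

-- ===== CLAIM (what is proved, stated in full; the proofs are below) =====
def Claim_equal_ssl_can : Prop := ∀ (linearr : List String), Dom_ssl_can linearr → Spec_ssl_can linearr (ssl_can linearr)

-- ===== LEMMAS AND PROOFS =====

-- occurrence of the pattern a b a starting at position m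
def OccAt (s : List Char) (a b : Char) : Prop :=
  ∃ m : Nat, s[m]? = some a ∧ s[m + 1]? = some b ∧ s[m + 2]? = some a

theorem take_three_eq_iff (l : List Char) (a b c : Char) :
    l.take 3 = [a, b, c] ↔ l[0]? = some a ∧ l[1]? = some b ∧ l[2]? = some c := by
  rcases l with _ | ⟨x, _ | ⟨y, _ | ⟨z, l⟩⟩⟩ <;> simp

theorem mem_foldl_addIf {α β : Type} [BEq α] [LawfulBEq α] (l : List β) (p : β → Prop)
    [DecidablePred p] (f : β → α) (init : PySem.Set α) (x : α) :
    x ∈ l.foldl (fun out k => if p k then out.add (f k) else out) init ↔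
      x ∈ init ∨ ∃ k ∈ l, p k ∧ x = f k := by
  induction l generalizing init with
  | nil => simp
  | cons hd tl ih =>
    simp only [List.foldl_cons, ih, List.mem_cons]
    by_cases h : p hd
    · simp only [if_pos h, PySem.Set.mem_add]
      aesop
    · simp only [if_neg h]
      aesop

theorem mem_foldl_update {α β : Type} [BEq α] [LawfulBEq α] (l : List β)
    (g : β → PySem.Set α) (init : PySem.Set α) (x : α) :
    x ∈ l.foldl (fun acc s => acc.update (g s)) init ↔ x ∈ init ∨ ∃ s ∈ l, x ∈ g s := by
  induction l generalizing init with
  | nil => simp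
  | cons hd tl ih =>
    simp only [List.foldl_cons, ih, PySem.Set.mem_update, List.mem_cons]
    aesop

theorem mem_aba_set (s : List Char) (x : List Char) :
    x ∈ aba_set s ↔ ∃ a b, a ≠ b ∧ OccAt s a b ∧ x = [a, b, a] := by
  unfold aba_set
  rw [mem_foldl_addIf]
  simp only [PySem.Set.empty, List.not_mem_nil, false_or]
  constructor
  · rintro ⟨k, hk, ⟨hne, heq⟩, hx⟩
    rw [PySem.List.mem_pyRange_one] at hk
    obtain ⟨m, rfl⟩ : ∃ m : Nat, k = (m : Int) := ⟨k.toNat, (Int.toNat_of_nonneg hk.1).symm⟩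
    have hm : m + 2 < s.length := by omega
    have h0 : s[m]? = some s[m] := List.getElem?_eq_getElem (by omega)
    have h1 : s[m+1]? = some s[m+1] := List.getElem?_eq_getElem (by omega)
    have h2 : s[m+2]? = some s[m+2] := List.getElem?_eq_getElem (by omega)
    have e1 : (m : Int) + 1 = ((m + 1 : Nat) : Int) := by push_cast; ring
    have e2 : (m : Int) + 2 = ((m + 2 : Nat) : Int) := by push_cast; ring
    rw [PySem.List.pyGet?_natCast, e1, PySem.List.pyGet?_natCast] at hne
    rw [PySem.List.pyGet?_natCast, e2, PySem.List.pyGet?_natCast] at heq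
    refine ⟨s[m], s[m+1], ?_, ⟨m, h0, h1, ?_⟩, ?_⟩
    · intro h; exact hne (by rw [h0, h1, h])
    · rw [← heq]; exact h0
    · have e3 : (m : Int) + 3 = ((m : Nat) : Int) + ((3 : Nat) : Int) := by push_cast; ring
      rw [e3, PySem.List.slice_natCast_add] at hx
      rw [hx, take_three_eq_iff]
      constructor
      · rw [List.getElem?_drop]; simpa using h0
      constructor
      · rw [List.getElem?_drop]; simpa using h1
      · have h3 : s[m] = s[m + 2] := by
          have h4 := heq
          rw [h0, h2] at h4
          exact Option.some.inj h4
        simp only [List.getElem?_drop, h2, ← h3]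
  · rintro ⟨a, b, hab, ⟨m, h0, h1, h2⟩, rfl⟩
    have hm2 : m + 2 < s.length := by
      obtain ⟨h', -⟩ := List.getElem?_eq_some_iff.mp h2; omega
    refine ⟨(m : Int), ?_, ⟨?_, ?_⟩, ?_⟩
    · rw [PySem.List.mem_pyRange_one]; omega
    · have e1 : (m : Int) + 1 = ((m + 1 : Nat) : Int) := by push_cast; ring
      rw [PySem.List.pyGet?_natCast, e1, PySem.List.pyGet?_natCast, h0, h1]
      simp [hab]
    · have e2 : (m : Int) + 2 = ((m + 2 : Nat) : Int) := by push_cast; ring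
      rw [PySem.List.pyGet?_natCast, e2, PySem.List.pyGet?_natCast, h0, h2]
    · have e3 : (m : Int) + 3 = ((m : Nat) : Int) + ((3 : Nat) : Int) := by push_cast; ring
      rw [e3, PySem.List.slice_natCast_add]
      symm
      rw [take_three_eq_iff]
      refine ⟨?_, ?_, ?_⟩ <;> rw [List.getElem?_drop]
      · simpa using h0
      · simpa using h1
      · simpa using h2

theorem mem_bab_set (s : List Char) (x : List Char) :
    x ∈ bab_set s ↔ ∃ a b, a ≠ b ∧ OccAt s a b ∧ x = [b, a, b] := by
  unfold bab_set
  rw [PySem.Set.mem_ofList]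
  simp only [List.mem_map]
  constructor
  · rintro ⟨ss, hss, rfl⟩
    obtain ⟨a, b, hab, hocc, rfl⟩ := (mem_aba_set s ss).mp hss
    refine ⟨a, b, hab, hocc, ?_⟩
    have hg : PySem.List.pyGet? [a, b, a] 1 = some b := by
      simp [PySem.List.pyGet?, PySem.List.pyIdx?]
    rw [hg]
    have hs : PySem.List.slice [a, b, a] (some 1) none = [b, a] := by
      have := PySem.List.slice_from_natCast (α := Char) [a, b, a] 1
      simpa using this
    rw [hs]
    rfl
  · rintro ⟨a, b, hab, hocc, rfl⟩
    refine ⟨[a, b, a], (mem_aba_set s _).mpr ⟨a, b, hab, hocc, rfl⟩, ?_⟩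
    have hg : PySem.List.pyGet? [a, b, a] 1 = some b := by
      simp [PySem.List.pyGet?, PySem.List.pyIdx?]
    rw [hg]
    have hs : PySem.List.slice [a, b, a] (some 1) none = [b, a] := by
      have := PySem.List.slice_from_natCast (α := Char) [a, b, a] 1
      simpa using this
    rw [hs]
    rfl

theorem mem_zip3 (s : List Char) (a b c : Char) :
    ((a, b), c) ∈ (s.zip (PySem.List.slice s (some 1) none)).zip (PySem.List.slice s (some 2) none) ↔
      ∃ m : Nat, s[m]? = some a ∧ s[m + 1]? = some b ∧ s[m + 2]? = some c := by
  have h1 : PySem.List.slice s (some 1) none = s.drop 1 := by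
    have := PySem.List.slice_from_natCast (α := Char) s 1; simpa using this
  have h2 : PySem.List.slice s (some 2) none = s.drop 2 := by
    have := PySem.List.slice_from_natCast (α := Char) s 2; simpa using this
  rw [h1, h2, List.mem_iff_getElem?]
  constructor
  · rintro ⟨m, hm⟩
    rw [List.getElem?_zip_eq_some] at hm
    obtain ⟨hm', hc⟩ := hm
    rw [List.getElem?_zip_eq_some] at hm'
    obtain ⟨ha, hb⟩ := hm'
    rw [List.getElem?_drop] at hb hc
    exact ⟨m, ha, by simpa [Nat.add_comm] using hb, by simpa [Nat.add_comm] using hc⟩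
  · rintro ⟨m, ha, hb, hc⟩
    refine ⟨m, ?_⟩
    rw [List.getElem?_zip_eq_some]
    refine ⟨?_, ?_⟩
    · rw [List.getElem?_zip_eq_some]
      exact ⟨ha, by rw [List.getElem?_drop]; simpa [Nat.add_comm] using hb⟩
    · rw [List.getElem?_drop]; simpa [Nat.add_comm] using hc

theorem isIn_bab_iff (h : List Char) (a b : Char) :
    PySem.Chars.isIn [b, a, b] h = true ↔ OccAt h b a := by
  rw [← PySem.Chars.exists_prefix_drop_iff_isIn]
  unfold OccAt
  constructor
  · rintro ⟨j, hj⟩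
    rw [List.prefix_iff_eq_take] at hj
    have := (take_three_eq_iff (h.drop j) b a b).mp (by simpa using hj.symm)
    simp only [List.getElem?_drop] at this
    exact ⟨j, this⟩
  · rintro ⟨m, h0, h1, h2⟩
    refine ⟨m, ?_⟩
    rw [List.prefix_iff_eq_take]
    symm
    simpa using (take_three_eq_iff (h.drop m) b a b).mpr
      (by simp only [List.getElem?_drop]; exact ⟨h0, h1, h2⟩)

-- joint characterization: both ports decide the same existential over the same even/odd slices
theorem core_eq (supers hypers : List String) :
    (decide (0 < PySem.Set.len
      ((supers.foldl (fun acc s => acc.update (aba_set s.toList)) PySem.Set.empty).inter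
       (hypers.foldl (fun acc s => acc.update (bab_set s.toList)) PySem.Set.empty)))) =
    ((PySem.Set.ofList (supers.flatMap (fun s =>
        ((((s.toList).zip (PySem.List.slice s.toList (some 1) none)).zip
            (PySem.List.slice s.toList (some 2) none)).filter
          (fun t => t.1.1 == t.2 && t.1.1 != t.1.2)).map (fun t => (t.1.1, t.1.2))))).any
      (fun p => hypers.any (fun hh => PySem.Chars.isIn [p.2, p.1, p.2] hh.toList))) := by
  rw [Bool.eq_iff_iff]
  simp only [decide_eq_true_eq, List.any_eq_true]
  have hlen : ∀ (t : PySem.Set (List Char)), (0 : Int) < PySem.Set.len t ↔ ∃ x, x ∈ t := by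
    intro t
    rw [show PySem.Set.len t = (t.length : Int) from by simp [PySem.Set.len]]
    rw [Int.natCast_pos]
    exact List.length_pos_iff_exists_mem
  rw [hlen]
  constructor
  · rintro ⟨x, hx⟩
    rw [PySem.Set.mem_inter, mem_foldl_update, mem_foldl_update] at hx
    simp only [PySem.Set.empty, List.not_mem_nil, false_or] at hx
    obtain ⟨⟨s, hs, hxa⟩, ⟨hh, hhh, hxb⟩⟩ := hx
    obtain ⟨a, b, hab, hocc, rfl⟩ := (mem_aba_set _ _).mp hxa
    obtain ⟨p, q, hpq, hocc', heq⟩ := (mem_bab_set _ _).mp hxb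
    -- [a,b,a] = [q,p,q] forces q = a, p = b
    have hq : q = a := by injection heq with h1 _; exact h1.symm
    have hp : p = b := by injection heq with _ h2'; injection h2' with h3 _; exact h3.symm
    rw [hq, hp] at hocc'
    refine ⟨(a, b), ?_, hh, hhh, ?_⟩
    · rw [PySem.Set.mem_ofList]
      simp only [List.mem_flatMap, List.mem_map, List.mem_filter]
      refine ⟨s, hs, ⟨((a, b), a), ⟨?_, ?_⟩, rfl⟩⟩
      · exact (mem_zip3 _ _ _ _).mpr hocc
      · simp [hab]
    · exact (isIn_bab_iff _ _ _).mpr hocc'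
  · rintro ⟨⟨a, b⟩, hpair, hh, hhh, hin⟩
    rw [PySem.Set.mem_ofList] at hpair
    simp only [List.mem_flatMap, List.mem_map, List.mem_filter] at hpair
    obtain ⟨s, hs, ⟨⟨⟨a', b'⟩, c'⟩, ⟨hmem, hcond⟩, heq⟩⟩ := hpair
    simp only [Prod.mk.injEq] at heq
    obtain ⟨ha', hb'⟩ := heq
    simp only [Bool.and_eq_true, beq_iff_eq, bne_iff_ne, ne_eq] at hcond
    obtain ⟨hac, hab⟩ := hcond
    subst ha' hb' hac
    simp only at hin
    refine ⟨[a', b', a'], ?_⟩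
    rw [PySem.Set.mem_inter, mem_foldl_update, mem_foldl_update]
    simp only [PySem.Set.empty, List.not_mem_nil, false_or]
    refine ⟨⟨s, hs, ?_⟩, ⟨hh, hhh, ?_⟩⟩
    · exact (mem_aba_set _ _).mpr ⟨a', b', hab, (mem_zip3 _ _ _ _).mp hmem, rfl⟩
    · exact (mem_bab_set _ _).mpr ⟨b', a', fun h => hab h.symm, (isIn_bab_iff _ _ _).mp hin, rfl⟩

-- ===== VERDICT (by name: the statement is the Claim_ definition above) =====
theorem ssl_can_spec : Claim_equal_ssl_can := by
  intro linearr _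
  unfold Spec_ssl_can ssl_can ssl_can_alt
  exact core_eq _ _
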